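-- pv_equiv track=rewrite | github.com/E-Aho/AdventOfCode2020 | Days/11/Day11.py | part_2
-- ===== SOURCE A (Python) =====
-- from collections import Counter
-- from copy import deepcopy
--
-- empty = "L"
--
-- occupied = "#"
--
-- floor = "."
--
-- def find_adjacent_visible_seats(seat_map: list, x: int, y: int):
--     directions = [(x_dir, y_dir) for x_dir in [-1, 0, 1] for y_dir in [-1, 0, 1] if not x_dir == y_dir == 0]
--
--     adj = []
--     x_min, x_max = 0, len(seat_map[0])
--     y_min, y_max = 0, len(seat_map)
--     for d in directions:
--         dist = 0
--         while True:
--             dist += 1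
--             x_i, y_i = x + dist * d[0], y + dist * d[1]
--             if not (x_min <= x_i < x_max and y_min <= y_i < y_max):
--                 break
--             else:
--                 if seat_map[y_i][x_i] != floor:
--                     adj.append((x_i, y_i))
--                     break
--     return adj
--
-- def apply_second_rule(seat_map: list):
--     current_seating = deepcopy(seat_map)
--     next_seating = deepcopy(seat_map)
--
--     x_range = range(len(seat_map[0]))
--     y_range = range(len(seat_map))
--
--     visible_dict = {}
--
--     for y in y_range:
--         for x in x_range:
--             if (seat := current_seating[y][x]) == floor:
--                 pass
--             else:
--                 if not (x, y) in visible_dict.keys():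
--                     visible_dict[(x, y)] = find_adjacent_visible_seats(current_seating, x, y)
--                 adjacent_seats = visible_dict[(x, y)]
--                 adjacent_states = [current_seating[y_i][x_i] for x_i, y_i in adjacent_seats]
--                 if seat == empty and occupied not in adjacent_states:
--                     next_seating[y][x] = occupied
--                 elif seat == occupied and Counter(adjacent_states)[occupied] >= 5:
--                     next_seating[y][x] = empty
--
--     return next_seating
--
-- def part_2(seat_map: list):
--     map_history = [seat_map]
--     map_history.append(apply_second_rule(seat_map))
--
--     while True:
--         if map_history[-1] == map_history[-2]:
--             return map_history[-1]
--         else: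
--             next_map = apply_second_rule(map_history[-1])
--             map_history.append(next_map)
-- ===== SOURCE B (Python) =====
-- empty = "L"
-- occupied = "#"
-- floor = "."
--
-- def part_2(seat_map: list):
--     height = len(seat_map)
--     width = len(seat_map[0])
--     grid = [list(row) for row in seat_map]
--     seats = [(x, y) for y in range(height) for x in range(width) if grid[y][x] != floor]
--     visible = {}
--     for (x, y) in seats:
--         hits = []
--         for dx, dy in ((-1, -1), (-1, 0), (-1, 1), (0, -1), (0, 1), (1, -1), (1, 0), (1, 1)):
--             xi, yi = x + dx, y + dy
--             while 0 <= xi < width and 0 <= yi < height: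
--                 if grid[yi][xi] != floor:
--                     hits.append((xi, yi))
--                     break
--                 xi += dx
--                 yi += dy
--         visible[(x, y)] = hits
--     while True:
--         changes = []
--         for (x, y) in seats:
--             c = grid[y][x]
--             occ = sum(1 for (xi, yi) in visible[(x, y)] if grid[yi][xi] == occupied)
--             if c == empty and occ == 0:
--                 changes.append((x, y, occupied))
--             elif c == occupied and occ >= 5:
--                 changes.append((x, y, empty))
--         if not changes:
--             return grid
--         for x, y, v in changes:
--             grid[y][x] = v
-- ===== Notes on version B (the rewrite author's own statement) =====
-- stated objective: faster
-- what changed: B computes each seat's line-of-sight neighbour list once from the static floor pattern and stores the seat list, then iterates the automaton by scanning only seats, counting occupied neighbours through the precomputed lists and applying a change list, instead of re-ray-casting all 8 directions from every cell on every step as A does.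
import Mathlib
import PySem

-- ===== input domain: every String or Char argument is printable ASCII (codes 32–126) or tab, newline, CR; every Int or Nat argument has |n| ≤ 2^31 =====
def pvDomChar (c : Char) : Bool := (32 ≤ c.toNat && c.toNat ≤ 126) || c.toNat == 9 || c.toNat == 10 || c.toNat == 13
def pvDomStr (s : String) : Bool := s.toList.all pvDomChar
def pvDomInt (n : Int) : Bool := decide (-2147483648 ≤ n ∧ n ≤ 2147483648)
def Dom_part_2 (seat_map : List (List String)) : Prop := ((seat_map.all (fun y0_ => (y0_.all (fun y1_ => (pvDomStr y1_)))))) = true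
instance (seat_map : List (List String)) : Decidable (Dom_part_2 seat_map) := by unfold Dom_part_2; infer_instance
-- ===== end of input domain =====

-- B precomputes each seat's line-of-sight neighbour list once (the floor pattern is static) and
-- then iterates the automaton by scanning seats and applying a change list, instead of
-- re-ray-casting all 8 directions from every cell at every step as A does.

-- shared indexing helpers (used by both ports; pure transliterations of grid[y][x] / grid[y][x] = v)
def pvCell (g : List (List String)) (y x : Int) : String :=
  (PySem.List.pyGet? ((PySem.List.pyGet? g y).getD []) x).getD ""

def pvCellN (g : List (List String)) (y x : Nat) : String :=
  (g.getD y []).getD x ""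

def pvSet2 (g : List (List String)) (y x : Nat) (v : String) : List (List String) :=
  g.set y ((g.getD y []).set x v)

-- fuel for the 'while True' fixpoint loops: more than the number of distinct reachable grids
-- (only cells holding "L"/"#" ever change), so the fuel-0 branch is never reached when the
-- Python terminates
def pvFuel (g : List (List String)) : Nat := 2 ^ (g.length * (g.headD []).length) + 1

-- ===== PORT A =====

-- the 'while True' ray walk of find_adjacent_visible_seats; fuel xmax+ymax+2 exceeds the number
-- of in-bounds points on the ray, so the fuel-0 branch is never reached
def pvRayA (g : List (List String)) (xmax ymax x y dx dy : Int) : Nat → Int → Option (Int × Int)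
  | 0, _ => none
  | fuel+1, dist =>
    let dist' := dist + 1
    let xi := x + dist' * dx
    let yi := y + dist' * dy
    if 0 ≤ xi ∧ xi < xmax ∧ 0 ≤ yi ∧ yi < ymax then
      (if pvCell g yi xi ≠ "." then some (xi, yi)
       else pvRayA g xmax ymax x y dx dy fuel dist')
    else none

def pvFindAdj (g : List (List String)) (x y : Int) : List (Int × Int) :=
  ([(-1,-1),(-1,0),(-1,1),(0,-1),(0,1),(1,-1),(1,0),(1,1)] : List (Int × Int)).foldl
    (fun adj d =>
      match pvRayA g ((g.headD []).length : Int) (g.length : Int) x y d.1 d.2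
              ((((g.headD []).length : Int) + (g.length : Int)).toNat + 2) 0 with
      | some p => adj ++ [p]
      | none => adj) []

def pvBodyA (g : List (List String)) (st : List (List String) × PySem.Dict (Nat × Nat) (List (Int × Int)))
    (y x : Nat) : List (List String) × PySem.Dict (Nat × Nat) (List (Int × Int)) :=
  let seat := pvCellN g y x
  if seat = "." then st
  else
    let vd := if st.2.contains (x, y) = false
              then st.2.insert (x, y) (pvFindAdj g (x : Int) (y : Int)) else st.2
    let adjacent := (vd.get? (x, y)).getD []
    let states := adjacent.map (fun p => pvCell g p.2 p.1)
    if seat = "L" ∧ states.contains "#" = false then (pvSet2 st.1 y x "#", vd)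
    else if seat = "#" ∧ (PySem.Dict.counter states).getD "#" 0 ≥ 5 then (pvSet2 st.1 y x "L", vd)
    else (st.1, vd)

def pvApplyRule (g : List (List String)) : List (List String) :=
  ((List.range g.length).foldl (fun st y =>
    (List.range (g.headD []).length).foldl (fun st x => pvBodyA g st y x) st)
    (g, (PySem.Dict.empty : PySem.Dict (Nat × Nat) (List (Int × Int))))).1

def pvLoopA : List (List String) → List (List String) → Nat → List (List String)
  | prev, cur, fuel =>
    if cur = prev then cur
    else match fuel with
      | 0 => cur
      | n+1 => pvLoopA cur (pvApplyRule cur) n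

def part_2 (seat_map : List (List String)) : List (List String) :=
  pvLoopA seat_map (pvApplyRule seat_map) (pvFuel seat_map)

-- ===== PORT B =====

-- Source B's inner 'while 0 <= xi < width and 0 <= yi < height' walk (fuel as in pvRayA)
def pvRayB (g : List (List String)) (w h dx dy : Int) : Nat → Int → Int → Option (Int × Int)
  | 0, _, _ => none
  | fuel+1, xi, yi =>
    if 0 ≤ xi ∧ xi < w ∧ 0 ≤ yi ∧ yi < h then
      (if pvCell g yi xi ≠ "." then some (xi, yi)
       else pvRayB g w h dx dy fuel (xi + dx) (yi + dy))
    else none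

def pvSeats (g : List (List String)) (h w : Nat) : List (Nat × Nat) :=
  (List.range h).flatMap (fun y =>
    (List.range w).filterMap (fun x => if pvCellN g y x ≠ "." then some (x, y) else none))

def pvHits (g : List (List String)) (h w : Nat) (p : Nat × Nat) : List (Int × Int) :=
  ([(-1,-1),(-1,0),(-1,1),(0,-1),(0,1),(1,-1),(1,0),(1,1)] : List (Int × Int)).foldl
    (fun hits d =>
      match pvRayB g (w : Int) (h : Int) d.1 d.2 (w + h + 2) ((p.1 : Int) + d.1) ((p.2 : Int) + d.2) with
      | some q => hits ++ [q]
      | none => hits) []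

def pvVisible (g : List (List String)) (h w : Nat) (seats : List (Nat × Nat)) :
    PySem.Dict (Nat × Nat) (List (Int × Int)) :=
  seats.foldl (fun vd p => vd.insert p (pvHits g h w p)) PySem.Dict.empty

def pvChanges (g : List (List String)) (seats : List (Nat × Nat))
    (visible : PySem.Dict (Nat × Nat) (List (Int × Int))) : List (Nat × Nat × String) :=
  seats.foldl (fun ch p =>
    let c := pvCellN g p.2 p.1
    let occ : Int := ((visible.get? p).getD []).foldl
      (fun s q => if pvCell g q.2 q.1 = "#" then s + 1 else s) 0
    if c = "L" ∧ occ = 0 then ch ++ [(p.1, p.2, "#")]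
    else if c = "#" ∧ occ ≥ 5 then ch ++ [(p.1, p.2, "L")]
    else ch) []

def pvLoopB (seats : List (Nat × Nat)) (visible : PySem.Dict (Nat × Nat) (List (Int × Int))) :
    List (List String) → Nat → List (List String)
  | grid, fuel =>
    let ch := pvChanges grid seats visible
    if ch = [] then grid
    else
      let grid' := ch.foldl (fun gg t => pvSet2 gg t.2.1 t.1 t.2.2) grid
      match fuel with
      | 0 => grid'
      | n+1 => pvLoopB seats visible grid' n

def part_2_alt (seat_map : List (List String)) : List (List String) :=
  let h := seat_map.length
  let w := (seat_map.headD []).length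
  let grid := seat_map.map (fun row => row)
  let seats := pvSeats grid h w
  let visible := pvVisible grid h w seats
  pvLoopB seats visible grid (pvFuel seat_map)

-- ===== PRECONDITION & SPEC =====
-- Pre_ excludes exactly the inputs where the Python A raises IndexError: the empty grid
-- (seat_map[0]) and grids in which some row is shorter than the first row (seat_map[y_i][x_i]).
def Pre_part_2 (seat_map : List (List String)) : Prop :=
  seat_map ≠ [] ∧ ∀ row ∈ seat_map, (seat_map.headD []).length ≤ row.length
instance (seat_map : List (List String)) : Decidable (Pre_part_2 seat_map) := by
  unfold Pre_part_2; infer_instance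

def pvWitness_part_2 : List (List String) := [["L", "."], ["#", "L"]]

def Spec_part_2 (seat_map : List (List String)) (out : List (List String)) : Prop :=
  out = part_2_alt seat_map
instance (seat_map : List (List String)) (out : List (List String)) :
    Decidable (Spec_part_2 seat_map out) := by unfold Spec_part_2; infer_instance

-- ===== CLAIM (what is proved, stated in full; the proofs are below) =====
def Claim_equal_part_2 : Prop := ∀ (seat_map : List (List String)), Dom_part_2 seat_map →
  Pre_part_2 seat_map → Spec_part_2 seat_map (part_2 seat_map)

-- ===== LEMMAS AND PROOFS =====

-- shape/pattern invariant tying every grid reached during the iteration to the input m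
def pvInv (m g : List (List String)) : Prop :=
  g.length = m.length ∧ (∀ y : Nat, (g.getD y []).length = (m.getD y []).length) ∧
    (∀ y x : Nat, pvCellN g y x = "." ↔ pvCellN m y x = ".")

theorem pvInv_refl (m : List (List String)) : pvInv m m := ⟨rfl, fun _ => rfl, fun _ _ => Iff.rfl⟩

theorem pvInv_headD (m g : List (List String)) (h : pvInv m g) :
    (g.headD []).length = (m.headD []).length := by
  have h0 := h.2.1 0
  cases g <;> cases m <;> simp_all [List.getD]

theorem pvCell_nonneg (g : List (List String)) (y x : Int) (hy : 0 ≤ y) (hx : 0 ≤ x) :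
    pvCell g y x = pvCellN g y.toNat x.toNat := by
  unfold pvCell pvCellN
  rw [PySem.List.pyGet?_of_nonneg _ hy, PySem.List.pyGet?_of_nonneg _ hx]
  simp [List.getD]

theorem pvRayA_congr (m g : List (List String)) (h : pvInv m g) (xmax ymax x y dx dy : Int)
    (f : Nat) (dist : Int) :
    pvRayA g xmax ymax x y dx dy f dist = pvRayA m xmax ymax x y dx dy f dist := by
  induction f generalizing dist with
  | zero => rfl
  | succ n ih =>
    simp only [pvRayA]
    split
    · rename_i hb
      have hpc : pvCell g (y + (dist + 1) * dy) (x + (dist + 1) * dx) = "."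
          ↔ pvCell m (y + (dist + 1) * dy) (x + (dist + 1) * dx) = "." := by
        rw [pvCell_nonneg g _ _ (by omega) (by omega), pvCell_nonneg m _ _ (by omega) (by omega)]
        exact h.2.2 _ _
      by_cases hg : pvCell g (y + (dist + 1) * dy) (x + (dist + 1) * dx) = "."
      · simp [hg, hpc.mp hg, ih]
      · have hm := fun hc => hg (hpc.mpr hc)
        rw [if_pos hg, if_pos hm]
    · rfl

theorem pvFindAdj_congr (m g : List (List String)) (h : pvInv m g) (x y : Int) :
    pvFindAdj g x y = pvFindAdj m x y := by
  unfold pvFindAdj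
  rw [pvInv_headD m g h, h.1]
  refine PySem.List.foldl_congr_mem _ _ _ _ ?_
  intro acc d _
  rw [pvRayA_congr m g h]

theorem pvRayA_eq_rayB (g : List (List String)) (xmax ymax x y dx dy : Int) :
    ∀ (f : Nat) (dist : Int),
      pvRayA g xmax ymax x y dx dy f dist
        = pvRayB g xmax ymax dx dy f (x + (dist + 1) * dx) (y + (dist + 1) * dy) := by
  intro f
  induction f with
  | zero => intro dist; rfl
  | succ n ih =>
    intro dist
    simp only [pvRayA, pvRayB]
    split
    · split
      · rfl
      · rw [ih (dist + 1)]
        congr 1 <;> ring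
    · rfl

-- value the automaton writes at a non-floor cell (none = cell keeps its value)
def pvUpd (g : List (List String)) (y x : Nat) : Option String :=
  let s := pvCellN g y x
  if s = "." then none
  else
    let states := (pvFindAdj g (x : Int) (y : Int)).map (fun p => pvCell g p.2 p.1)
    if s = "L" ∧ states.contains "#" = false then some "#"
    else if s = "#" ∧ (PySem.Dict.counter states).getD "#" 0 ≥ 5 then some "L"
    else none

def pvStepVal (g : List (List String)) (y x : Nat) : String :=
  (pvUpd g y x).getD (pvCellN g y x)

-- pointwise description of pvSet2
theorem pvSet2_length (g : List (List String)) (y x : Nat) (v : String) :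
    (pvSet2 g y x v).length = g.length := by
  simp [pvSet2]

theorem pvSet2_rowlen (g : List (List String)) (y x : Nat) (v : String) (y' : Nat) :
    ((pvSet2 g y x v).getD y' []).length = (g.getD y' []).length := by
  unfold pvSet2
  by_cases hy : y' = y
  · subst hy
    by_cases hl : y' < g.length
    · simp [List.getD_eq_getElem?_getD, hl]
    · rw [List.set_eq_of_length_le (by omega)]
  · simp [List.getD_eq_getElem?_getD, Ne.symm hy]

theorem pvSet2_cell (g : List (List String)) (y x : Nat) (v : String)
    (hy : y < g.length) (hx : x < (g.getD y []).length) (y' x' : Nat) :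
    pvCellN (pvSet2 g y x v) y' x' = if y' = y ∧ x' = x then v else pvCellN g y' x' := by
  unfold pvSet2 pvCellN
  by_cases hyy : y' = y
  · subst hyy
    simp only [List.getD_eq_getElem?_getD, List.getElem?_set, hy, if_pos trivial]
    by_cases hxx : x' = x
    · subst hxx
      have hx' : x' < (g[y']?.getD []).length := by
        rwa [← List.getD_eq_getElem?_getD]
      simp [hx']
    · simp [Ne.symm hxx, hxx]
  · simp [List.getD_eq_getElem?_getD, Ne.symm hyy, hyy]

-- the memo dict of apply_second_rule only ever stores correct visibility lists
def pvDictOK (g : List (List String)) (vd : PySem.Dict (Nat × Nat) (List (Int × Int))) : Prop :=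
  ∀ k v, vd.get? k = some v → v = pvFindAdj g (k.1 : Int) (k.2 : Int)

def pvStepCell (g nx : List (List String)) (y x : Nat) : List (List String) :=
  match pvUpd g y x with
  | some v => pvSet2 nx y x v
  | none => nx

theorem pvBodyA_fst (g : List (List String)) (nx : List (List String))
    (vd : PySem.Dict (Nat × Nat) (List (Int × Int))) (y x : Nat) (hP : pvDictOK g vd) :
    (pvBodyA g (nx, vd) y x).1 = pvStepCell g nx y x := by
  have hadj : (((if vd.contains (x, y) = false
      then vd.insert (x, y) (pvFindAdj g (x : Int) (y : Int)) else vd).get? (x, y)).getD [])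
      = pvFindAdj g (x : Int) (y : Int) := by
    by_cases hc : vd.contains (x, y) = false
    · rw [if_pos hc, PySem.Dict.get?_insert_self]; rfl
    · rw [if_neg hc]
      have hsome : (vd.get? (x, y)).isSome := by
        rw [← PySem.Dict.contains_eq_isSome_get?]; simpa using hc
      obtain ⟨v, hv⟩ := Option.isSome_iff_exists.mp hsome
      rw [hv]
      simpa using hP (x, y) v hv
  by_cases hs : pvCellN g y x = "."
  · simp [pvBodyA, pvStepCell, pvUpd, hs]
  · simp only [pvBodyA, pvStepCell, pvUpd, hs, if_false, hadj]
    split_ifs <;> rfl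

theorem pvBodyA_snd (g : List (List String)) (st : List (List String) × PySem.Dict (Nat × Nat) (List (Int × Int)))
    (y x : Nat) (hP : pvDictOK g st.2) : pvDictOK g (pvBodyA g st y x).2 := by
  by_cases hs : pvCellN g y x = "."
  · simpa [pvBodyA, hs] using hP
  · have hins : pvDictOK g (if st.2.contains (x, y) = false
        then st.2.insert (x, y) (pvFindAdj g (x : Int) (y : Int)) else st.2) := by
      by_cases hc : st.2.contains (x, y) = false
      · rw [if_pos hc]
        intro k v hk
        rw [PySem.Dict.get?_insert] at hk
        split at hk
        · rename_i hkk; subst hkk; simpa using hk.symm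
        · exact hP k v hk
      · rw [if_neg hc]; exact hP
    simp only [pvBodyA, hs, if_false]
    split_ifs with h1 <;> simp only [h1] at hins <;> simpa using hins

theorem pvInnerA (g : List (List String)) (y : Nat) (xs : List Nat) :
    ∀ (st : List (List String) × PySem.Dict (Nat × Nat) (List (Int × Int))), pvDictOK g st.2 →
      ((xs.foldl (fun st x => pvBodyA g st y x) st).1
          = xs.foldl (fun nx x => pvStepCell g nx y x) st.1)
        ∧ pvDictOK g (xs.foldl (fun st x => pvBodyA g st y x) st).2 := by
  induction xs with
  | nil => intro st hP; exact ⟨rfl, hP⟩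
  | cons x t ih =>
    intro st hP
    have h2 := pvBodyA_snd g st y x hP
    have h1 := pvBodyA_fst g st.1 st.2 y x hP
    have := ih (pvBodyA g st y x) h2
    simp only [List.foldl_cons]
    refine ⟨?_, this.2⟩
    rw [this.1, h1]

theorem pvOuterA (g : List (List String)) (w : Nat) (ys : List Nat) :
    ∀ (st : List (List String) × PySem.Dict (Nat × Nat) (List (Int × Int))), pvDictOK g st.2 →
      ((ys.foldl (fun st y => (List.range w).foldl (fun st x => pvBodyA g st y x) st) st).1
          = ys.foldl (fun nx y => (List.range w).foldl (fun nx x => pvStepCell g nx y x) nx) st.1)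
        ∧ pvDictOK g (ys.foldl (fun st y => (List.range w).foldl (fun st x => pvBodyA g st y x) st) st).2 := by
  induction ys with
  | nil => intro st hP; exact ⟨rfl, hP⟩
  | cons y t ih =>
    intro st hP
    have hin := pvInnerA g y (List.range w) st hP
    have := ih _ hin.2
    simp only [List.foldl_cons]
    refine ⟨?_, this.2⟩
    rw [this.1, hin.1]

-- the pure (dict-free) sweep
def pvPure (g : List (List String)) : List (List String) :=
  (List.range g.length).foldl
    (fun nx y => (List.range (g.headD []).length).foldl (fun nx x => pvStepCell g nx y x) nx) g

theorem pvApplyRule_eq_pure (g : List (List String)) : pvApplyRule g = pvPure g := by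
  unfold pvApplyRule pvPure
  exact (pvOuterA g (g.headD []).length (List.range g.length) _
    (by intro k v hk; simp [PySem.Dict.get?_empty] at hk)).1

theorem pvStepCell_length (g nx : List (List String)) (y x : Nat) :
    (pvStepCell g nx y x).length = nx.length := by
  unfold pvStepCell; split
  · exact pvSet2_length nx y x _
  · rfl

theorem pvStepCell_rowlen (g nx : List (List String)) (y x y' : Nat) :
    ((pvStepCell g nx y x).getD y' []).length = ((nx.getD y' [])).length := by
  unfold pvStepCell; split
  · exact pvSet2_rowlen nx y x _ y'
  · rfl

theorem pvInnerFold_length (g : List (List String)) (y : Nat) (xs : List Nat) (nx : List (List String)) :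
    ((xs.foldl (fun nx x => pvStepCell g nx y x) nx).length = nx.length)
      ∧ ∀ y', (((xs.foldl (fun nx x => pvStepCell g nx y x) nx).getD y' [])).length = ((nx.getD y' [])).length := by
  induction xs generalizing nx with
  | nil => exact ⟨rfl, fun _ => rfl⟩
  | cons x t ih =>
    simp only [List.foldl_cons]
    refine ⟨?_, fun y' => ?_⟩
    · rw [(ih _).1, pvStepCell_length]
    · rw [(ih _).2 y', pvStepCell_rowlen]

theorem pvInnerFold_cell (g : List (List String)) (y : Nat) (w : Nat) :
    ∀ (nx : List (List String)), y < nx.length → w ≤ ((nx.getD y [])).length →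
      ∀ y' x', pvCellN ((List.range w).foldl (fun nx x => pvStepCell g nx y x) nx) y' x'
        = if y' = y ∧ x' < w then (pvUpd g y' x').getD (pvCellN nx y' x') else pvCellN nx y' x' := by
  induction w with
  | zero => intro nx _ _ y' x'; simp
  | succ w ih =>
    intro nx hy hw y' x'
    rw [List.range_succ, List.foldl_append, List.foldl_cons, List.foldl_nil]
    have hlen := pvInnerFold_length g y (List.range w) nx
    have hcell := ih nx hy (by omega)
    set nx' := (List.range w).foldl (fun nx x => pvStepCell g nx y x) nx with hnx'
    have hyl : y < nx'.length := by rw [hlen.1]; exact hy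
    have hxl : w < ((nx'.getD y [])).length := by rw [hlen.2 y]; omega
    unfold pvStepCell
    cases hu : pvUpd g y w with
    | none =>
      rw [hcell y' x']
      by_cases h1 : y' = y ∧ x' < w
      · rw [if_pos h1, if_pos ⟨h1.1, by omega⟩]
      · by_cases h2 : y' = y ∧ x' < w + 1
        · have hxw : x' = w := by omega
          subst hxw
          rw [if_neg h1, if_pos h2, h2.1, hu]
          rfl
        · rw [if_neg h1, if_neg h2]
    | some v =>
      rw [pvSet2_cell nx' y w v hyl hxl y' x', hcell y' x']
      by_cases h0 : y' = y ∧ x' = w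
      · rw [if_pos h0, if_pos ⟨h0.1, by omega⟩]
        obtain ⟨e1, e2⟩ := h0
        subst e1; subst e2
        rw [hu]
        rfl
      · rw [if_neg h0]
        by_cases h1 : y' = y ∧ x' < w
        · rw [if_pos h1, if_pos ⟨h1.1, by omega⟩]
        · have h2 : ¬ (y' = y ∧ x' < w + 1) := by omega
          rw [if_neg h1, if_neg h2]

theorem pvOuterFold_shape (g : List (List String)) (w : Nat) (ys : List Nat) (nx : List (List String)) :
    ((ys.foldl (fun nx y => (List.range w).foldl (fun nx x => pvStepCell g nx y x) nx) nx).length = nx.length)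
      ∧ ∀ y', (((ys.foldl (fun nx y => (List.range w).foldl (fun nx x => pvStepCell g nx y x) nx) nx).getD y' [])).length
          = ((nx.getD y' [])).length := by
  induction ys generalizing nx with
  | nil => exact ⟨rfl, fun _ => rfl⟩
  | cons y t ih =>
    simp only [List.foldl_cons]
    have h1 := pvInnerFold_length g y (List.range w) nx
    refine ⟨?_, fun y' => ?_⟩
    · rw [(ih _).1, h1.1]
    · rw [(ih _).2 y', h1.2 y']

theorem pvOuterFold_cell (g : List (List String)) (w : Nat) :
    ∀ (h' : Nat) (nx : List (List String)), h' ≤ nx.length →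
      (∀ y, y < h' → w ≤ ((nx.getD y [])).length) →
      ∀ y' x', pvCellN ((List.range h').foldl
          (fun nx y => (List.range w).foldl (fun nx x => pvStepCell g nx y x) nx) nx) y' x'
        = if y' < h' ∧ x' < w then (pvUpd g y' x').getD (pvCellN nx y' x') else pvCellN nx y' x' := by
  intro h'
  induction h' with
  | zero => intro nx _ _ y' x'; simp
  | succ h' ih =>
    intro nx hh hw y' x'
    rw [List.range_succ, List.foldl_append, List.foldl_cons, List.foldl_nil]
    have hsh := pvOuterFold_shape g w (List.range h') nx
    set nx' := (List.range h').foldl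
      (fun nx y => (List.range w).foldl (fun nx x => pvStepCell g nx y x) nx) nx with hnx'
    have hcell := ih nx (by omega) (fun y hy => hw y (by omega))
    have hyl : h' < nx'.length := by rw [hsh.1]; omega
    have hwl : w ≤ ((nx'.getD h' [])).length := by rw [hsh.2 h']; exact hw h' (by omega)
    rw [pvInnerFold_cell g h' w nx' hyl hwl y' x']
    rw [hcell y' x']
    by_cases h0 : y' = h' ∧ x' < w
    · have hn : ¬ (y' < h' ∧ x' < w) := by omega
      rw [if_pos h0, if_neg hn, if_pos ⟨by omega, h0.2⟩]
    · rw [if_neg h0]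
      by_cases h1 : y' < h' ∧ x' < w
      · rw [if_pos h1, if_pos ⟨by omega, h1.2⟩]
      · have h2 : ¬ (y' < h' + 1 ∧ x' < w) := by omega
        rw [if_neg h1, if_neg h2]

-- A's double loop with its memo dict equals the pointwise description
theorem pvApplyRule_length (g : List (List String)) : (pvApplyRule g).length = g.length := by
  rw [pvApplyRule_eq_pure]
  exact (pvOuterFold_shape g _ _ g).1

theorem pvApplyRule_rowlen (g : List (List String)) (y : Nat) :
    ((pvApplyRule g).getD y []).length = (g.getD y []).length := by
  rw [pvApplyRule_eq_pure]
  exact (pvOuterFold_shape g _ _ g).2 y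

theorem pvApplyRule_cell (g : List (List String))
    (hrow : ∀ y, y < g.length → (g.headD []).length ≤ (g.getD y []).length) (y x : Nat) :
    pvCellN (pvApplyRule g) y x =
      if y < g.length ∧ x < (g.headD []).length then pvStepVal g y x else pvCellN g y x := by
  rw [pvApplyRule_eq_pure]
  exact pvOuterFold_cell g _ g.length g le_rfl hrow y x

-- grid extensionality from the pointwise view
theorem pvGridExt (g1 g2 : List (List String)) (hl : g1.length = g2.length)
    (hr : ∀ y, ((g1.getD y []).length) = ((g2.getD y []).length))
    (hc : ∀ y x, pvCellN g1 y x = pvCellN g2 y x) : g1 = g2 := by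
  apply List.ext_getElem hl
  intro y hy1 hy2
  apply List.ext_getElem
  · have := hr y
    simpa [List.getD_eq_getElem?_getD, List.getElem?_eq_getElem, hy1, hy2] using this
  · intro x hx1 hx2
    have := hc y x
    unfold pvCellN at this
    simpa [List.getD_eq_getElem?_getD, List.getElem?_eq_getElem, hy1, hy2, hx1, hx2] using this

-- the value written by the automaton never creates or destroys floor
theorem pvStepVal_floor (g : List (List String)) (y x : Nat) :
    (pvStepVal g y x = ".") ↔ (pvCellN g y x = ".") := by
  unfold pvStepVal pvUpd
  by_cases hs : pvCellN g y x = "."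
  · simp [hs]
  · simp only [hs, if_false]
    split_ifs <;> simp [hs]

theorem pvUpd_ne (g : List (List String)) (y x : Nat) (v : String)
    (h : pvUpd g y x = some v) : v ≠ pvCellN g y x := by
  simp only [pvUpd] at h
  split_ifs at h <;> simp_all <;> (cases h; decide)

theorem pvInv_step (m g : List (List String)) (hInv : pvInv m g)
    (hrow : ∀ y, y < g.length → (g.headD []).length ≤ (g.getD y []).length) :
    pvInv m (pvApplyRule g) := by
  refine ⟨?_, ?_, ?_⟩
  · rw [pvApplyRule_length]; exact hInv.1
  · intro y; rw [pvApplyRule_rowlen]; exact hInv.2.1 y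
  · intro y x
    rw [pvApplyRule_cell g hrow y x]
    split_ifs with h
    · rw [pvStepVal_floor]; exact hInv.2.2 y x
    · exact hInv.2.2 y x

-- seats list
theorem pvSeats_mem (m : List (List String)) (h w : Nat) (p : Nat × Nat) :
    p ∈ pvSeats m h w ↔ p.1 < w ∧ p.2 < h ∧ pvCellN m p.2 p.1 ≠ "." := by
  obtain ⟨x, y⟩ := p
  simp only [pvSeats, List.mem_flatMap, List.mem_filterMap, List.mem_range]
  constructor
  · rintro ⟨y', hy', x', hx', he⟩
    split at he
    · rename_i hcond
      cases he
      exact ⟨hx', hy', hcond⟩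
    · simp at he
  · rintro ⟨h1, h2, h3⟩
    exact ⟨y, h2, x, h1, by rw [if_pos h3]⟩

theorem pvSeats_nodup (m : List (List String)) (h w : Nat) : (pvSeats m h w).Nodup := by
  unfold pvSeats
  rw [List.nodup_flatMap]
  have hsnd : ∀ (y : Nat) (a : Nat × Nat),
      a ∈ (List.range w).filterMap (fun x => if pvCellN m y x ≠ "." then some (x, y) else none) →
        a.2 = y := by
    intro y a ha
    obtain ⟨x, _, he⟩ := List.mem_filterMap.mp ha
    split at he
    · cases he; rfl
    · simp at he
  constructor
  · intro y _
    refine List.Nodup.filterMap ?_ (List.nodup_range)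
    intro a a' b hb hb'
    split at hb
    · cases hb
      split at hb'
      · cases hb'; rfl
      · simp at hb'
    · simp at hb
  · have hnd : (List.range h).Pairwise (· ≠ ·) := List.nodup_range
    refine hnd.imp ?_
    intro y y' hne a ha ha'
    exact hne (by rw [← hsnd y a ha, hsnd y' a ha'])

-- the precomputed visibility dict
theorem pvFoldInsert_get? (v : Nat × Nat → List (Int × Int)) (q : Nat × Nat) :
    ∀ (l : List (Nat × Nat)) (d : PySem.Dict (Nat × Nat) (List (Int × Int))),
      (l.foldl (fun d p => d.insert p (v p)) d).get? q = if q ∈ l then some (v q) else d.get? q := by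
  intro l
  induction l with
  | nil => intro d; simp
  | cons p t ih =>
    intro d
    rw [List.foldl_cons, ih]
    by_cases hq : q ∈ t
    · rw [if_pos hq, if_pos (List.mem_cons_of_mem _ hq)]
    · rw [if_neg hq, PySem.Dict.get?_insert]
      by_cases hqp : q = p
      · rw [if_pos hqp, if_pos (by simp [hqp]), hqp]
      · rw [if_neg hqp, if_neg (by simp [hqp, hq])]

theorem pvVisible_get? (m : List (List String)) (h w : Nat) (seats : List (Nat × Nat))
    (q : Nat × Nat) (hq : q ∈ seats) :
    (pvVisible m h w seats).get? q = some (pvHits m h w q) := by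
  unfold pvVisible
  rw [pvFoldInsert_get?, if_pos hq]

theorem pvHits_eq_findAdj (g : List (List String)) (p : Nat × Nat) :
    pvHits g g.length (g.headD []).length p = pvFindAdj g (p.1 : Int) (p.2 : Int) := by
  unfold pvHits pvFindAdj
  refine PySem.List.foldl_congr_mem _ _ _ _ ?_
  intro acc d _
  have hfuel : ((((g.headD []).length : Int)) + ((g.length : Int))).toNat + 2
      = (g.headD []).length + g.length + 2 := by omega
  have h1 : (p.1 : Int) + (0 + 1) * d.1 = (p.1 : Int) + d.1 := by ring
  have h2 : (p.2 : Int) + (0 + 1) * d.2 = (p.2 : Int) + d.2 := by ring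
  rw [pvRayA_eq_rayB g _ _ _ _ d.1 d.2 _ 0, hfuel, h1, h2]

-- the change-list loop body as an Option-producing function
def pvChOpt (g : List (List String)) (visible : PySem.Dict (Nat × Nat) (List (Int × Int)))
    (p : Nat × Nat) : Option (Nat × Nat × String) :=
  let c := pvCellN g p.2 p.1
  let occ : Int := ((visible.get? p).getD []).foldl
    (fun s q => if pvCell g q.2 q.1 = "#" then s + 1 else s) 0
  if c = "L" ∧ occ = 0 then some (p.1, p.2, "#")
  else if c = "#" ∧ occ ≥ 5 then some (p.1, p.2, "L")
  else none

theorem pvFoldAppendOpt {α β : Type} (f : α → Option β) (body : List β → α → List β)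
    (hb : ∀ acc p, body acc p = match f p with | some t => acc ++ [t] | none => acc) :
    ∀ (l : List α) (acc : List β), l.foldl body acc = acc ++ l.filterMap f := by
  intro l
  induction l with
  | nil => intro acc; simp
  | cons p t ih =>
    intro acc
    rw [List.foldl_cons, hb]
    cases hf : f p <;> rw [ih] <;> simp [hf]

theorem pvChanges_eq_filterMap (g : List (List String)) (seats : List (Nat × Nat))
    (visible : PySem.Dict (Nat × Nat) (List (Int × Int))) :
    pvChanges g seats visible = seats.filterMap (pvChOpt g visible) := by
  unfold pvChanges
  rw [pvFoldAppendOpt (pvChOpt g visible) _ ?_ seats []]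
  · simp
  · intro acc p
    simp only [pvChOpt]
    split_ifs <;> rfl

theorem pvChOpt_coords (g : List (List String)) (visible : PySem.Dict (Nat × Nat) (List (Int × Int)))
    (p : Nat × Nat) (t : Nat × Nat × String) (h : pvChOpt g visible p = some t) :
    t.1 = p.1 ∧ t.2.1 = p.2 := by
  simp only [pvChOpt] at h
  split_ifs at h <;> cases h <;> exact ⟨rfl, rfl⟩

theorem pvChOpt_eq (g : List (List String)) (visible : PySem.Dict (Nat × Nat) (List (Int × Int)))
    (p : Nat × Nat) (hv : visible.get? p = some (pvFindAdj g (p.1 : Int) (p.2 : Int))) :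
    pvChOpt g visible p = (pvUpd g p.2 p.1).map (fun v => (p.1, p.2, v)) := by
  simp only [pvChOpt, pvUpd, hv, Option.getD_some]
  have hocc : ((pvFindAdj g (p.1 : Int) (p.2 : Int)).foldl
      (fun s q => if pvCell g q.2 q.1 = "#" then s + 1 else s) (0 : Int))
      = (((pvFindAdj g (p.1 : Int) (p.2 : Int)).map (fun q => pvCell g q.2 q.1)).count "#" : Int) := by
    rw [PySem.List.foldl_ite_add_one, List.count_eq_countP, List.countP_map]
    have hcp : List.countP (fun q => decide (pvCell g q.2 q.1 = "#")) (pvFindAdj g (p.1 : Int) (p.2 : Int))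
        = List.countP ((fun x => x == "#") ∘ fun q => pvCell g q.2 q.1) (pvFindAdj g (p.1 : Int) (p.2 : Int)) := by
      apply List.countP_congr
      intro a _
      by_cases hx : pvCell g a.2 a.1 = "#" <;> simp [Function.comp, hx]
    rw [hcp]
    simp
  rw [hocc]
  have e1 : (((pvFindAdj g (p.1 : Int) (p.2 : Int)).map (fun q => pvCell g q.2 q.1)).contains "#" = false)
      = ((((pvFindAdj g (p.1 : Int) (p.2 : Int)).map (fun q => pvCell g q.2 q.1)).count "#" : Int) = 0) := by
    apply propext
    simp [List.count_eq_zero, List.contains_eq_mem]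
  have e2 : ((PySem.Dict.counter ((pvFindAdj g (p.1 : Int) (p.2 : Int)).map (fun q => pvCell g q.2 q.1))).getD "#" 0 ≥ 5)
      = ((((pvFindAdj g (p.1 : Int) (p.2 : Int)).map (fun q => pvCell g q.2 q.1)).count "#" : Int) ≥ 5) := by
    rw [PySem.Dict.getD_counter]
  simp only [e1, e2]
  split_ifs <;> first | rfl | simp_all

-- applying the change list
theorem pvApplyCh_shape (cs : List (Nat × Nat × String)) :
    ∀ (g : List (List String)),
      ((cs.foldl (fun gg t => pvSet2 gg t.2.1 t.1 t.2.2) g).length = g.length)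
        ∧ ∀ y, (((cs.foldl (fun gg t => pvSet2 gg t.2.1 t.1 t.2.2) g).getD y [])).length
            = ((g.getD y [])).length := by
  induction cs with
  | nil => intro g; exact ⟨rfl, fun _ => rfl⟩
  | cons t u ih =>
    intro g
    rw [List.foldl_cons]
    refine ⟨?_, fun y => ?_⟩
    · rw [(ih _).1, pvSet2_length]
    · rw [(ih _).2 y, pvSet2_rowlen]

theorem pvApplyCh_cell (cs : List (Nat × Nat × String)) :
    ∀ (g : List (List String)),
      (∀ t ∈ cs, t.2.1 < g.length ∧ t.1 < ((g.getD t.2.1 []).length)) →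
      ((cs.map (fun t => (t.1, t.2.1))).Nodup) →
      ∀ y x, pvCellN (cs.foldl (fun gg t => pvSet2 gg t.2.1 t.1 t.2.2) g) y x
        = match cs.find? (fun t => t.1 == x && t.2.1 == y) with
          | some t => t.2.2
          | none => pvCellN g y x := by
  induction cs with
  | nil => intro g _ _ y x; rfl
  | cons t u ih =>
    intro g hin hnd y x
    rw [List.foldl_cons]
    have hhd := hin t (List.mem_cons_self)
    have hin' : ∀ t' ∈ u, t'.2.1 < (pvSet2 g t.2.1 t.1 t.2.2).length
        ∧ t'.1 < (((pvSet2 g t.2.1 t.1 t.2.2).getD t'.2.1 []).length) := by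
      intro t' ht'
      rw [pvSet2_length, pvSet2_rowlen]
      exact hin t' (List.mem_cons_of_mem _ ht')
    have hnd2 : ((t.1, t.2.1) :: u.map (fun t => (t.1, t.2.1))).Nodup := by
      simpa [List.map_cons] using hnd
    have hnd' : (u.map (fun t => (t.1, t.2.1))).Nodup := (List.nodup_cons.mp hnd2).2
    rw [ih _ hin' hnd' y x]
    by_cases hfirst : t.1 = x ∧ t.2.1 = y
    · have hft : ((fun t' => t'.1 == x && t'.2.1 == y) t) = true := by
        simp [hfirst.1, hfirst.2]
      rw [List.find?_cons_of_pos (p := fun t' => t'.1 == x && t'.2.1 == y) (a := t) (l := u) hft]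
      have hnone : u.find? (fun t' => t'.1 == x && t'.2.1 == y) = none := by
        rw [List.find?_eq_none]
        intro t' ht' hp
        have hco : (t'.1, t'.2.1) = (t.1, t.2.1) := by
          simp only [Bool.and_eq_true, beq_iff_eq] at hp
          rw [hp.1, hp.2, hfirst.1, hfirst.2]
        have hmem : (t.1, t.2.1) ∈ u.map (fun t => (t.1, t.2.1)) := by
          rw [← hco]; exact List.mem_map_of_mem ht'
        exact (List.nodup_cons.mp hnd2).1 hmem
      rw [hnone]
      rw [pvSet2_cell g t.2.1 t.1 t.2.2 hhd.1 hhd.2 y x,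
        if_pos ⟨hfirst.2.symm, hfirst.1.symm⟩]
    · have hft : ¬ ((fun t' => t'.1 == x && t'.2.1 == y) t) = true := by
        simpa using hfirst
      rw [List.find?_cons_of_neg (p := fun t' => t'.1 == x && t'.2.1 == y) (a := t) (l := u) hft]
      cases hf : u.find? (fun t' => t'.1 == x && t'.2.1 == y) with
      | some t' => rfl
      | none =>
        rw [pvSet2_cell g t.2.1 t.1 t.2.2 hhd.1 hhd.2 y x,
          if_neg (fun hc => hfirst ⟨hc.2.symm, hc.1.symm⟩)]

-- coordinates of the change list form a sublist of the seat list
theorem pvFilterMapCoords (g : List (List String)) (vis : PySem.Dict (Nat × Nat) (List (Int × Int))) :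
    ∀ l : List (Nat × Nat),
      ((l.filterMap (pvChOpt g vis)).map (fun t => (t.1, t.2.1))).Sublist l := by
  intro l
  induction l with
  | nil => simp
  | cons p u ih =>
    rw [List.filterMap_cons]
    cases hc : pvChOpt g vis p with
    | none => exact ih.cons p
    | some t =>
      rw [List.map_cons]
      have hco := pvChOpt_coords g vis p t hc
      have he : ((t.1, t.2.1) : Nat × Nat) = p := by rw [hco.1, hco.2]
      rw [he]
      exact ih.cons₂ p

theorem pvChanges_mem (m g : List (List String)) (hInv : pvInv m g) :
    ∀ t ∈ pvChanges g (pvSeats m m.length (m.headD []).length)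
        (pvVisible m m.length (m.headD []).length (pvSeats m m.length (m.headD []).length)),
      ((t.1, t.2.1) : Nat × Nat) ∈ pvSeats m m.length (m.headD []).length
        ∧ pvUpd g t.2.1 t.1 = some t.2.2 := by
  intro t ht
  rw [pvChanges_eq_filterMap] at ht
  obtain ⟨p, hp, he⟩ := List.mem_filterMap.mp ht
  rw [pvChOpt_eq g _ p (by
    rw [pvVisible_get? m _ _ _ p hp, pvHits_eq_findAdj m p, pvFindAdj_congr m g hInv])] at he
  obtain ⟨v, hv, he2⟩ := Option.map_eq_some_iff.mp he
  subst he2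
  exact ⟨by simpa using hp, by simpa using hv⟩

theorem pvChanges_in (m g : List (List String)) (hInv : pvInv m g)
    (hrowm : ∀ y, y < m.length → (m.headD []).length ≤ ((m.getD y []).length)) :
    ∀ t ∈ pvChanges g (pvSeats m m.length (m.headD []).length)
        (pvVisible m m.length (m.headD []).length (pvSeats m m.length (m.headD []).length)),
      t.2.1 < g.length ∧ t.1 < ((g.getD t.2.1 []).length) := by
  intro t ht
  have hs := (pvChanges_mem m g hInv t ht).1
  rw [pvSeats_mem] at hs
  refine ⟨by rw [hInv.1]; exact hs.2.1, ?_⟩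
  have h1 : (m.headD []).length ≤ ((g.getD t.2.1 []).length) := by
    rw [hInv.2.1]; exact hrowm _ hs.2.1
  omega

theorem pvChanges_nodup (m g : List (List String)) :
    ((pvChanges g (pvSeats m m.length (m.headD []).length)
        (pvVisible m m.length (m.headD []).length (pvSeats m m.length (m.headD []).length))).map
      (fun t => (t.1, t.2.1))).Nodup := by
  rw [pvChanges_eq_filterMap]
  exact (pvSeats_nodup m _ _).sublist (pvFilterMapCoords _ _ _)

-- A's sweep equals B's change-list application, on any grid reachable from m
theorem pvStep_eq (m g : List (List String)) (hInv : pvInv m g)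
    (hrowm : ∀ y, y < m.length → (m.headD []).length ≤ ((m.getD y []).length)) :
    pvApplyRule g = (pvChanges g (pvSeats m m.length (m.headD []).length)
        (pvVisible m m.length (m.headD []).length (pvSeats m m.length (m.headD []).length))).foldl
      (fun gg t => pvSet2 gg t.2.1 t.1 t.2.2) g := by
  have hw_g : (g.headD []).length = (m.headD []).length := pvInv_headD m g hInv
  have hh_g : g.length = m.length := hInv.1
  have hrow_g : ∀ y, y < g.length → (g.headD []).length ≤ ((g.getD y []).length) := by
    intro y hy
    rw [hw_g, hInv.2.1 y]
    exact hrowm y (by omega)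
  have hin := pvChanges_in m g hInv hrowm
  have hnd := pvChanges_nodup m g
  apply pvGridExt
  · rw [pvApplyRule_length, (pvApplyCh_shape _ g).1]
  · intro y
    rw [pvApplyRule_rowlen, (pvApplyCh_shape _ g).2 y]
  · intro y x
    rw [pvApplyRule_cell g hrow_g y x, pvApplyCh_cell _ g hin hnd y x]
    by_cases hyx : y < g.length ∧ x < (g.headD []).length
    · rw [if_pos hyx]
      cases hu : pvUpd g y x with
      | none =>
        have hfind : (pvChanges g (pvSeats m m.length (m.headD []).length)
            (pvVisible m m.length (m.headD []).length (pvSeats m m.length (m.headD []).length))).find?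
              (fun t => t.1 == x && t.2.1 == y) = none := by
          rw [List.find?_eq_none]
          intro t ht hp
          simp only [Bool.and_eq_true, beq_iff_eq] at hp
          have h1 := (pvChanges_mem m g hInv t ht).2
          rw [hp.1, hp.2, hu] at h1
          exact absurd h1 (by simp)
        rw [hfind]
        unfold pvStepVal
        rw [hu]
        rfl
      | some v =>
        have hseat : pvCellN g y x ≠ "." := by
          intro hs
          simp [pvUpd, hs] at hu
        have hps : ((x, y) : Nat × Nat) ∈ pvSeats m m.length (m.headD []).length := by
          rw [pvSeats_mem]
          exact ⟨by rw [← hw_g]; exact hyx.2, by rw [← hh_g]; exact hyx.1,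
            fun hc => hseat ((hInv.2.2 y x).mpr hc)⟩
        have ht : ((x, y, v) : Nat × Nat × String) ∈ pvChanges g (pvSeats m m.length (m.headD []).length)
            (pvVisible m m.length (m.headD []).length (pvSeats m m.length (m.headD []).length)) := by
          rw [pvChanges_eq_filterMap]
          refine List.mem_filterMap.mpr ⟨(x, y), hps, ?_⟩
          rw [pvChOpt_eq g _ (x, y) (by
            rw [pvVisible_get? m _ _ _ _ hps, pvHits_eq_findAdj m (x, y), pvFindAdj_congr m g hInv])]
          simp only at hu ⊢
          rw [hu]
          rfl
        cases hf : (pvChanges g (pvSeats m m.length (m.headD []).length)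
            (pvVisible m m.length (m.headD []).length (pvSeats m m.length (m.headD []).length))).find?
              (fun t => t.1 == x && t.2.1 == y) with
        | none =>
          have := List.find?_eq_none.mp hf _ ht
          simp at this
        | some t' =>
          have hpt' := List.find?_some hf
          have hmem' := List.mem_of_find?_eq_some hf
          simp only [Bool.and_eq_true, beq_iff_eq] at hpt'
          have ht' : t' = (x, y, v) :=
            List.inj_on_of_nodup_map hnd hmem' ht (by rw [hpt'.1, hpt'.2])
          rw [ht']
          unfold pvStepVal
          rw [hu]
          rfl
    · rw [if_neg hyx]
      have hfind : (pvChanges g (pvSeats m m.length (m.headD []).length)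
          (pvVisible m m.length (m.headD []).length (pvSeats m m.length (m.headD []).length))).find?
            (fun t => t.1 == x && t.2.1 == y) = none := by
        rw [List.find?_eq_none]
        intro t ht hp
        simp only [Bool.and_eq_true, beq_iff_eq] at hp
        have hs := (pvChanges_mem m g hInv t ht).1
        rw [pvSeats_mem] at hs
        exact hyx ⟨by rw [hh_g, ← hp.2]; exact hs.2.1, by rw [hw_g, ← hp.1]; exact hs.1⟩
      rw [hfind]

theorem pvChanges_nil_fix (m g : List (List String)) (hInv : pvInv m g)
    (hrowm : ∀ y, y < m.length → (m.headD []).length ≤ ((m.getD y []).length))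
    (h : pvChanges g (pvSeats m m.length (m.headD []).length)
      (pvVisible m m.length (m.headD []).length (pvSeats m m.length (m.headD []).length)) = []) :
    pvApplyRule g = g := by
  rw [pvStep_eq m g hInv hrowm, h]
  rfl

theorem pvChanges_ne_fix (m g : List (List String)) (hInv : pvInv m g)
    (hrowm : ∀ y, y < m.length → (m.headD []).length ≤ ((m.getD y []).length))
    (h : pvChanges g (pvSeats m m.length (m.headD []).length)
      (pvVisible m m.length (m.headD []).length (pvSeats m m.length (m.headD []).length)) ≠ []) :
    pvApplyRule g ≠ g := by
  rw [pvStep_eq m g hInv hrowm]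
  cases hcs : pvChanges g (pvSeats m m.length (m.headD []).length)
      (pvVisible m m.length (m.headD []).length (pvSeats m m.length (m.headD []).length)) with
  | nil => exact absurd hcs h
  | cons t u =>
    intro heq
    have hin := pvChanges_in m g hInv hrowm
    have hnd := pvChanges_nodup m g
    rw [hcs] at hin hnd
    have hcell := pvApplyCh_cell (t :: u) g hin hnd t.2.1 t.1
    rw [List.find?_cons_of_pos (p := fun t' => t'.1 == t.1 && t'.2.1 == t.2.1) (a := t) (l := u)
      (by simp)] at hcell
    rw [heq] at hcell
    have h2 := (pvChanges_mem m g hInv t (by rw [hcs]; exact List.mem_cons_self)).2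
    exact pvUpd_ne g t.2.1 t.1 t.2.2 h2 hcell.symm

theorem pvLoopA_unfold (prev cur : List (List String)) (fuel : Nat) :
    pvLoopA prev cur fuel = if cur = prev then cur else
      match fuel with
      | 0 => cur
      | n+1 => pvLoopA cur (pvApplyRule cur) n := by
  cases fuel <;> rfl

theorem pvLoopB_unfold (seats : List (Nat × Nat)) (visible : PySem.Dict (Nat × Nat) (List (Int × Int)))
    (grid : List (List String)) (fuel : Nat) :
    pvLoopB seats visible grid fuel =
      if pvChanges grid seats visible = [] then grid
      else
        match fuel with
        | 0 => (pvChanges grid seats visible).foldl (fun gg t => pvSet2 gg t.2.1 t.1 t.2.2) grid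
        | n+1 => pvLoopB seats visible
            ((pvChanges grid seats visible).foldl (fun gg t => pvSet2 gg t.2.1 t.1 t.2.2) grid) n := by
  cases fuel <;> rfl

theorem pvLoop_eq (m : List (List String))
    (hrowm : ∀ y, y < m.length → (m.headD []).length ≤ ((m.getD y []).length)) :
    ∀ (fuel : Nat) (g : List (List String)), pvInv m g →
      pvLoopA g (pvApplyRule g) fuel
        = pvLoopB (pvSeats m m.length (m.headD []).length)
            (pvVisible m m.length (m.headD []).length (pvSeats m m.length (m.headD []).length)) g fuel := by
  intro fuel
  induction fuel with
  | zero =>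
    intro g hInv
    rw [pvLoopA_unfold, pvLoopB_unfold]
    by_cases hch : pvChanges g (pvSeats m m.length (m.headD []).length)
        (pvVisible m m.length (m.headD []).length (pvSeats m m.length (m.headD []).length)) = []
    · have hfix := pvChanges_nil_fix m g hInv hrowm hch
      rw [if_pos hfix, if_pos hch]
      exact hfix
    · have hne := pvChanges_ne_fix m g hInv hrowm hch
      rw [if_neg hne, if_neg hch]
      exact pvStep_eq m g hInv hrowm
  | succ n ih =>
    intro g hInv
    rw [pvLoopA_unfold, pvLoopB_unfold]
    by_cases hch : pvChanges g (pvSeats m m.length (m.headD []).length)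
        (pvVisible m m.length (m.headD []).length (pvSeats m m.length (m.headD []).length)) = []
    · have hfix := pvChanges_nil_fix m g hInv hrowm hch
      rw [if_pos hfix, if_pos hch]
      exact hfix
    · have hne := pvChanges_ne_fix m g hInv hrowm hch
      rw [if_neg hne, if_neg hch]
      have hrow_g : ∀ y, y < g.length → (g.headD []).length ≤ ((g.getD y []).length) := by
        intro y hy
        rw [pvInv_headD m g hInv, hInv.2.1 y]
        exact hrowm y (by rw [← hInv.1]; omega)
      rw [← pvStep_eq m g hInv hrowm]
      exact ih (pvApplyRule g) (pvInv_step m g hInv hrow_g)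

-- ===== VERDICT (by name: the statement is the Claim_ definition above) =====
theorem part_2_spec : Claim_equal_part_2 := by
  intro g _ hpre
  unfold Spec_part_2
  have hrowm : ∀ y, y < g.length → (g.headD []).length ≤ ((g.getD y []).length) := by
    intro y hy
    have hmem : g.getD y [] ∈ g := by
      rw [List.getD_eq_getElem?_getD, List.getElem?_eq_getElem hy]
      exact List.getElem_mem hy
    exact hpre.2 _ hmem
  simp only [part_2, part_2_alt, List.map_id']
  exact pvLoop_eq g hrowm (pvFuel g) g (pvInv_refl g)
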